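-- pv_equiv track=rewrite | github.com/padymkoclab/python-utils | utils/number.py | get_digits_from_left_to_right
-- ===== SOURCE A (Python) =====
-- def get_digits_from_left_to_right(number, lst=None):
--     """Return digits of an integer excluding the sign."""
--
--     if lst is None:
--         lst = list()
--
--     number = abs(number)
--
--     if number < 10:
--         lst.append(number)
--         return tuple(lst)
--
--     get_digits_from_left_to_right(number // 10, lst)
--     lst.append(number % 10)
--
--     return tuple(lst)
-- ===== SOURCE B (Python) =====
-- def get_digits_from_left_to_right(number, lst=None):
--     """Return digits of an integer excluding the sign."""
--     if lst is None:
--         lst = list()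
--     number = abs(number)
--     tmp = []
--     while number >= 10:
--         tmp.append(number % 10)
--         number //= 10
--     tmp.append(number)
--     lst.extend(reversed(tmp))
--     return tuple(lst)
-- ===== Notes on version B (the rewrite author's own statement) =====
-- stated objective: alternative
-- what changed: Replaces A's recursion (which rebuilds a tuple at every level) with a single iterative while-loop that collects least-significant digits into a temporary list and reverses it once; the optional-lst mutation and accumulator semantics are preserved.
import Mathlib
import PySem

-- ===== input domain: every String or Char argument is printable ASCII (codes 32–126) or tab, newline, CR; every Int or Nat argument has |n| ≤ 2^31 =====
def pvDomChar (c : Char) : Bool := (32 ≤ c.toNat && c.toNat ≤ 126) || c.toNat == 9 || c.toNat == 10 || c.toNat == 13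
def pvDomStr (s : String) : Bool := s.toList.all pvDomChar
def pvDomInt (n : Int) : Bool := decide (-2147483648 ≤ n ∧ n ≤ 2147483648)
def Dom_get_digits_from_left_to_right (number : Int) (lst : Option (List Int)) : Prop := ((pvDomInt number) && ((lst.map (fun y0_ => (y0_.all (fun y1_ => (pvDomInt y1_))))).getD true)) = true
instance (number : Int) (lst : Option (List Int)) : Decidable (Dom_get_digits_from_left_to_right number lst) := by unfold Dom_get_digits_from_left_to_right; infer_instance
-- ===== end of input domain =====

-- ===== PORT A =====
-- A: recursive; each call takes abs, and below 10 appends the digit, else recurses on number // 10.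
def pvGoA (n : Int) (l : List Int) : List Int :=
  if |n| < 10 then l ++ [|n|]
  else (pvGoA (PySem.Int.floordiv |n| 10) l) ++ [PySem.Int.mod |n| 10]
termination_by n.natAbs
decreasing_by
  have h1 : PySem.Int.floordiv |n| 10 = |n| / 10 :=
    PySem.Int.floordiv_eq_ediv_of_pos (by decide)
  have habs : |n| = (n.natAbs : Int) := Int.abs_eq_natAbs n
  rw [h1]
  omega

-- Return-value port of A (in Python A also mutates a caller-supplied lst; only the return value is claimed here).
def get_digits_from_left_to_right (number : Int) (lst : Option (List Int)) : List Int :=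
  pvGoA number (lst.getD [])

-- ===== PORT B =====
-- B: while number >= 10, push number % 10 onto tmp and divide; returns (final number, tmp).
def pvLoopB (n : Int) (tmp : List Int) : Int × List Int :=
  if 10 ≤ n then pvLoopB (PySem.Int.floordiv n 10) (tmp ++ [PySem.Int.mod n 10])
  else (n, tmp)
termination_by n.natAbs
decreasing_by
  have h1 : PySem.Int.floordiv n 10 = n / 10 :=
    PySem.Int.floordiv_eq_ediv_of_pos (by decide)
  rw [h1]
  omega

def get_digits_from_left_to_right_alt (number : Int) (lst : Option (List Int)) : List Int :=
  let l := lst.getD []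
  let p := pvLoopB |number| []
  l ++ (p.2 ++ [p.1]).reverse

-- ===== PRECONDITION & SPEC =====
def Spec_get_digits_from_left_to_right (number : Int) (lst : Option (List Int)) (out : List Int) : Prop := out = get_digits_from_left_to_right_alt number lst
instance (number : Int) (lst : Option (List Int)) (out : List Int) : Decidable (Spec_get_digits_from_left_to_right number lst out) := by unfold Spec_get_digits_from_left_to_right; infer_instance

-- ===== CLAIM (what is proved, stated in full; the proofs are below) =====
def Claim_equal_get_digits_from_left_to_right : Prop := ∀ (number : Int) (lst : Option (List Int)), Dom_get_digits_from_left_to_right number lst → Spec_get_digits_from_left_to_right number lst (get_digits_from_left_to_right number lst)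

-- ===== LEMMAS AND PROOFS =====

-- pvGoA only depends on |n|
theorem pvGoA_abs (n : Int) (l : List Int) : pvGoA |n| l = pvGoA n l := by
  rw [pvGoA.eq_def, pvGoA.eq_def (n := n), abs_abs]

-- accumulator generalization for A's recursion
theorem pvGoA_acc (n : Int) (l : List Int) : pvGoA n l = l ++ pvGoA n [] := by
  by_cases h : |n| < 10
  · rw [pvGoA.eq_def (n := n) (l := l), pvGoA.eq_def (n := n) (l := ([] : List Int))]
    simp [h]
  · have h1 : PySem.Int.floordiv |n| 10 = |n| / 10 :=
      PySem.Int.floordiv_eq_ediv_of_pos (by decide)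
    have habs : |n| = (n.natAbs : Int) := Int.abs_eq_natAbs n
    rw [pvGoA.eq_def (n := n) (l := l), pvGoA.eq_def (n := n) (l := ([] : List Int))]
    simp only [if_neg h]
    rw [pvGoA_acc (PySem.Int.floordiv |n| 10) l]
    simp only [List.append_assoc]
termination_by n.natAbs
decreasing_by
  rw [h1]
  omega

-- accumulator generalization for B's loop
theorem pvLoopB_acc (n : Int) (tmp : List Int) :
    pvLoopB n tmp = ((pvLoopB n []).1, tmp ++ (pvLoopB n []).2) := by
  by_cases h : 10 ≤ n
  · have h1 : PySem.Int.floordiv n 10 = n / 10 :=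
      PySem.Int.floordiv_eq_ediv_of_pos (by decide)
    rw [pvLoopB.eq_def, pvLoopB.eq_def (n := n) (tmp := [])]
    simp only [if_pos h]
    rw [pvLoopB_acc (PySem.Int.floordiv n 10) (tmp ++ [PySem.Int.mod n 10]),
        pvLoopB_acc (PySem.Int.floordiv n 10) ([] ++ [PySem.Int.mod n 10])]
    simp only [List.nil_append, List.append_assoc]
  · rw [pvLoopB.eq_def, pvLoopB.eq_def (n := n) (tmp := [])]
    simp only [if_neg h, List.append_nil]
termination_by n.natAbs
decreasing_by
  all_goals rw [h1]; omega

-- the two digit extractions agree on nonnegative inputs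
theorem pvGo_eq_loop (n : Int) (hn : 0 ≤ n) :
    pvGoA n [] = ((pvLoopB n []).2 ++ [(pvLoopB n []).1]).reverse := by
  by_cases h : n < 10
  · rw [pvGoA.eq_def, pvLoopB.eq_def]
    simp only [abs_of_nonneg hn, if_pos h, if_neg (not_le.mpr h), List.nil_append,
      List.reverse_cons, List.reverse_nil]
  · have habs : |n| = n := abs_of_nonneg hn
    have h10 : (10 : Int) ≤ n := not_lt.mp h
    have h1 : PySem.Int.floordiv n 10 = n / 10 :=
      PySem.Int.floordiv_eq_ediv_of_pos (by decide)
    have ih := pvGo_eq_loop (PySem.Int.floordiv n 10) (by rw [h1]; omega)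
    rw [pvGoA.eq_def, pvLoopB.eq_def]
    simp only [habs, if_neg h, if_pos h10]
    rw [pvLoopB_acc, pvGoA_acc]
    simp only [List.nil_append]
    rw [ih]
    simp only [List.reverse_append, List.reverse_cons, List.reverse_nil, List.nil_append,
      List.cons_append, List.singleton_append]
termination_by n.natAbs
decreasing_by
  rw [h1]
  omega

-- ===== VERDICT (by name: the statement is the Claim_ definition above) =====
theorem get_digits_from_left_to_right_spec : Claim_equal_get_digits_from_left_to_right := by
  intro number lst _
  unfold Spec_get_digits_from_left_to_right get_digits_from_left_to_right get_digits_from_left_to_right_alt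
  rw [← pvGoA_abs, pvGoA_acc, pvGo_eq_loop |number| (abs_nonneg number)]
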